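-- pv_equiv track=rewrite | github.com/datawhales/Python-Code-Notes | ps/check_social_distance.py | check
-- ===== SOURCE A (Python) =====
-- from itertools import combinations
--
-- def get_position(place):
--     coo = [(i, j) for i in range(len(place)) for j in range(len(place[0])) if place[i][j] == 'P']
--     return coo
--
-- def check(place):
--     # coo는 P의 위치
--     coo = get_position(place)
--
--     for (p1_x, p1_y), (p2_x, p2_y) in combinations(coo, 2):
--         if abs(p1_x - p2_x) + abs(p1_y - p2_y) == 1:
--             return 0
--         elif abs(p1_x - p2_x) + abs(p1_y - p2_y) == 2:
--             if p1_x == p2_x: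
--                 if place[p1_x][min(p1_y, p2_y) + 1] != 'X':
--                     return 0
--             elif p1_y == p2_y:
--                 if place[min(p1_x, p2_x) + 1][p1_y] != 'X':
--                     return 0
--             # abs(p1_x - p2_x) == abs(p1_y - p2_y) == 1인 경우
--             else:
--                 c1_x, c1_y = p1_x, p2_y
--                 c2_x, c2_y = p2_x, p1_y
--                 if place[c1_x][c1_y] != 'X' or place[c2_x][c2_y] != 'X':
--                     return 0
--     return 1
-- ===== SOURCE B (Python) =====
-- def check(place):
--     # Single pass over the grid: for each 'P', inspect only its constant-size
--     # forward neighborhood (right, down, two-step gaps, diagonals) instead of all pairs.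
--     R = len(place)
--     C = len(place[0]) if place else 0
--
--     def hit(i, j):
--         if place[i][j] != 'P':
--             return False
--         return (
--             (j + 1 < C and place[i][j + 1] == 'P')
--             or (i + 1 < R and place[i + 1][j] == 'P')
--             or (j + 2 < C and place[i][j + 2] == 'P' and place[i][j + 1] != 'X')
--             or (i + 2 < R and place[i + 2][j] == 'P' and place[i + 1][j] != 'X')
--             or (i + 1 < R and j + 1 < C and place[i + 1][j + 1] == 'P'
--                 and (place[i][j + 1] != 'X' or place[i + 1][j] != 'X'))
--             or (i + 1 < R and j - 1 >= 0 and place[i + 1][j - 1] == 'P'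
--                 and (place[i][j - 1] != 'X' or place[i + 1][j] != 'X'))
--         )
--
--     return 0 if any(hit(i, j) for i in range(R) for j in range(C)) else 1
-- ===== Notes on version B (the rewrite author's own statement) =====
-- stated objective: alternative
-- what changed: B replaces A's scan over all pairs of 'P' positions (with midpoint checks per pair) by a single pass over the grid that checks only each P's constant-size forward neighborhood (right, down, two-step gaps, two diagonals).
import Mathlib
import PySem

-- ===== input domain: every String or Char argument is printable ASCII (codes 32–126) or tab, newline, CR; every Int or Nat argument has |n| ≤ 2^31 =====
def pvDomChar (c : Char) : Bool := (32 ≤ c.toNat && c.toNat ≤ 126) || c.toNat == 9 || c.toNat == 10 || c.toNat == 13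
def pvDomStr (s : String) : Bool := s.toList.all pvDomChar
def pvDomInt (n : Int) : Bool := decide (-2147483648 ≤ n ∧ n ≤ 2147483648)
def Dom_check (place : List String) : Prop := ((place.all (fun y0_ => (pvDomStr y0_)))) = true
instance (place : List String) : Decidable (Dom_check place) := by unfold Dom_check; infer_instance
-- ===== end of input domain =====

-- B replaces A's scan over all pairs of 'P' cells by a single pass over the grid that
-- inspects only each P's constant-size forward neighborhood (a different algorithm,
-- similar measured cost).

-- ===== PORT A =====
-- place[i][j], totalized with a default; Pre_check keeps every actually-performed access in range
def cellA (place : List String) (i j : Int) : Char :=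
  ((PySem.List.pyGet? place i).bind (fun s => PySem.Str.pyGet? s j)).getD '?'

-- get_position: [(i, j) for i in range(len(place)) for j in range(len(place[0])) if place[i][j] == 'P']
def cooA (place : List String) : List (Int × Int) :=
  (PySem.List.pyRange 0 (place.length : Int) 1).flatMap (fun i =>
    (PySem.List.pyRange 0 (PySem.Str.len (place.headD "")) 1).filterMap (fun j =>
      if cellA place i j = 'P' then some (i, j) else none))

-- itertools.combinations(coo, 2)
def pairsA {α : Type} : List α → List (α × α)
  | [] => []
  | x :: xs => xs.map (fun y => (x, y)) ++ pairsA xs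

-- the body of A's loop: does this pair make it `return 0`?
def violA (place : List String) (p q : Int × Int) : Bool :=
  if |p.1 - q.1| + |p.2 - q.2| = 1 then true
  else if |p.1 - q.1| + |p.2 - q.2| = 2 then
    if p.1 = q.1 then cellA place p.1 (min p.2 q.2 + 1) != 'X'
    else if p.2 = q.2 then cellA place (min p.1 q.1 + 1) p.2 != 'X'
    else (cellA place p.1 q.2 != 'X' || cellA place q.1 p.2 != 'X')
  else false

-- A's for-loop with its early return
def loopA (place : List String) : List ((Int × Int) × (Int × Int)) → Int
  | [] => 1
  | pq :: rest => if violA place pq.1 pq.2 then 0 else loopA place rest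

def check (place : List String) : Int :=
  loopA place (pairsA (cooA place))

-- ===== PORT B =====
def cellB (place : List String) (i j : Int) : Char :=
  ((PySem.List.pyGet? place i).bind (fun s => PySem.Str.pyGet? s j)).getD '?'

-- B's hit(i, j): is the P at (i, j) in violation with a forward neighbour?
def hitB (place : List String) (R C i j : Int) : Bool :=
  if cellB place i j != 'P' then false
  else
    (decide (j + 1 < C) && (cellB place i (j + 1) == 'P'))
    || (decide (i + 1 < R) && (cellB place (i + 1) j == 'P'))
    || (decide (j + 2 < C) && (cellB place i (j + 2) == 'P') && (cellB place i (j + 1) != 'X'))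
    || (decide (i + 2 < R) && (cellB place (i + 2) j == 'P') && (cellB place (i + 1) j != 'X'))
    || (decide (i + 1 < R) && decide (j + 1 < C) && (cellB place (i + 1) (j + 1) == 'P')
        && ((cellB place i (j + 1) != 'X') || (cellB place (i + 1) j != 'X')))
    || (decide (i + 1 < R) && decide (0 ≤ j - 1) && (cellB place (i + 1) (j - 1) == 'P')
        && ((cellB place i (j - 1) != 'X') || (cellB place (i + 1) j != 'X')))

def check_alt (place : List String) : Int :=
  let R : Int := place.length
  let C : Int := PySem.Str.len (place.headD "")
  if (PySem.List.pyRange 0 R 1).any (fun i =>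
       (PySem.List.pyRange 0 C 1).any (fun j => hitB place R C i j)) then 0 else 1

-- ===== PRECONDITION & SPEC =====
-- Pre_ excludes ragged inputs with a row SHORTER than the first row: there A's full
-- comprehension over range(len(place[0])) raises IndexError (it returns no value).
def Pre_check (place : List String) : Prop :=
  ∀ s ∈ place, PySem.Str.len (place.headD "") ≤ PySem.Str.len s
instance (place : List String) : Decidable (Pre_check place) := by unfold Pre_check; infer_instance

def pvWitness_check : List String := ["POP", "OXO", "PXP"]

def Spec_check (place : List String) (out : Int) : Prop := out = check_alt place
instance (place : List String) (out : Int) : Decidable (Spec_check place out) := by unfold Spec_check; infer_instance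

-- ===== CLAIM (what is proved, stated in full; the proofs are below) =====
def Claim_equal_check : Prop := ∀ (place : List String), Dom_check place → Pre_check place → Spec_check place (check place)

-- ===== LEMMAS AND PROOFS =====

theorem loopA_any (place : List String) (l : List ((Int × Int) × (Int × Int))) :
    loopA place l = if l.any (fun pq => violA place pq.1 pq.2) then 0 else 1 := by
  induction l with
  | nil => simp [loopA]
  | cons pq rest ih =>
    rw [loopA]
    by_cases h : violA place pq.1 pq.2 = true
    · rw [if_pos h, if_pos (by simp [h])]
    · rw [if_neg h, ih,
        show ((pq :: rest).any fun pq => violA place pq.1 pq.2)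
            = (rest.any fun pq => violA place pq.1 pq.2) from by
          simp [List.any_cons, h]]

theorem mem_pairsA {α : Type} {l : List α} {p q : α} (h : (p, q) ∈ pairsA l) : p ∈ l ∧ q ∈ l := by
  induction l with
  | nil => simp [pairsA] at h
  | cons x xs ih =>
    simp only [pairsA, List.mem_append, List.mem_map] at h
    rcases h with ⟨y, hy, he⟩ | h
    · cases he; exact ⟨List.mem_cons_self, List.mem_cons_of_mem _ hy⟩
    · exact ⟨List.mem_cons_of_mem _ (ih h).1, List.mem_cons_of_mem _ (ih h).2⟩

theorem pairsA_cover {α : Type} {l : List α} {p q : α} (hp : p ∈ l) (hq : q ∈ l) (hne : p ≠ q) :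
    (p, q) ∈ pairsA l ∨ (q, p) ∈ pairsA l := by
  induction l with
  | nil => simp at hp
  | cons x xs ih =>
    simp only [pairsA, List.mem_append, List.mem_map]
    rcases List.mem_cons.1 hp with rfl | hp'
    · have hq' : q ∈ xs := by
        rcases List.mem_cons.1 hq with rfl | h
        · exact absurd rfl hne
        · exact h
      left; left; exact ⟨q, hq', rfl⟩
    · rcases List.mem_cons.1 hq with rfl | hq'
      · right; left; exact ⟨p, hp', rfl⟩
      · rcases ih hp' hq' with h | h
        · left; right; exact h
        · right; right; exact h

theorem violA_symm (place : List String) (p q : Int × Int) : violA place p q = violA place q p := by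
  obtain ⟨i1, j1⟩ := p; obtain ⟨i2, j2⟩ := q
  simp only [violA]
  rw [abs_sub_comm i1 i2, abs_sub_comm j1 j2]
  by_cases h1 : |i2 - i1| + |j2 - j1| = 1
  · simp [h1]
  · by_cases h2 : |i2 - i1| + |j2 - j1| = 2
    · simp only [h2, if_true]
      by_cases h3 : i1 = i2
      · subst h3; simp [min_comm]
      · have h3' : ¬ i2 = i1 := fun h => h3 h.symm
        by_cases h4 : j1 = j2
        · subst h4; simp [h3, h3', min_comm]
        · have h4' : ¬ j2 = j1 := fun h => h4 h.symm
          simp [h3, h3', h4, h4', Bool.or_comm]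
    · simp [h1, h2]

theorem mem_cooA (place : List String) (i j : Int) :
    (i, j) ∈ cooA place ↔
      (0 ≤ i ∧ i < (place.length : Int) ∧ 0 ≤ j ∧ j < PySem.Str.len (place.headD "")
        ∧ cellA place i j = 'P') := by
  simp only [cooA, List.mem_flatMap, List.mem_filterMap, PySem.List.mem_pyRange_one]
  constructor
  · rintro ⟨a, ⟨ha0, haR⟩, b, ⟨hb0, hbC⟩, hb⟩
    split at hb
    · rename_i hP; cases hb; exact ⟨ha0, haR, hb0, hbC, hP⟩
    · cases hb
  · rintro ⟨h1, h2, h3, h4, h5⟩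
    exact ⟨i, ⟨h1, h2⟩, j, ⟨h3, h4⟩, by simp [h5]⟩

-- the six local patterns of B, as a proposition
theorem hitB_true_iff (place : List String) (R C i j : Int) :
    hitB place R C i j = true ↔
      cellA place i j = 'P' ∧
      ((j + 1 < C ∧ cellA place i (j + 1) = 'P')
        ∨ (i + 1 < R ∧ cellA place (i + 1) j = 'P')
        ∨ (j + 2 < C ∧ cellA place i (j + 2) = 'P' ∧ cellA place i (j + 1) ≠ 'X')
        ∨ (i + 2 < R ∧ cellA place (i + 2) j = 'P' ∧ cellA place (i + 1) j ≠ 'X')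
        ∨ (i + 1 < R ∧ j + 1 < C ∧ cellA place (i + 1) (j + 1) = 'P'
            ∧ (cellA place i (j + 1) ≠ 'X' ∨ cellA place (i + 1) j ≠ 'X'))
        ∨ (i + 1 < R ∧ 0 ≤ j - 1 ∧ cellA place (i + 1) (j - 1) = 'P'
            ∧ (cellA place i (j - 1) ≠ 'X' ∨ cellA place (i + 1) j ≠ 'X'))) := by
  rw [show @cellA = @cellB from rfl]
  by_cases hc : cellB place i j = 'P'
  · simp [hitB, hc, and_assoc, or_assoc]
  · simp [hitB, hc]

theorem viol_to_hit (place : List String)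
    {i1 j1 i2 j2 : Int}
    (hp : 0 ≤ i1 ∧ i1 < (place.length : Int) ∧ 0 ≤ j1 ∧ j1 < PySem.Str.len (place.headD "") ∧ cellA place i1 j1 = 'P')
    (hq : 0 ≤ i2 ∧ i2 < (place.length : Int) ∧ 0 ≤ j2 ∧ j2 < PySem.Str.len (place.headD "") ∧ cellA place i2 j2 = 'P')
    (hv : violA place (i1, j1) (i2, j2) = true) :
    ∃ i j, 0 ≤ i ∧ i < (place.length : Int) ∧ 0 ≤ j ∧ j < PySem.Str.len (place.headD "")
      ∧ hitB place (place.length : Int) (PySem.Str.len (place.headD "")) i j = true := by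
  obtain ⟨hi10, hi1R, hj10, hj1C, hP1⟩ := hp
  obtain ⟨hi20, hi2R, hj20, hj2C, hP2⟩ := hq
  simp only [violA] at hv
  split_ifs at hv with h1 h2 h3 h4
  · -- Manhattan distance 1
    simp only [Int.abs_eq_natAbs] at h1
    have hc : (i2 = i1 ∧ j2 = j1 + 1) ∨ (i2 = i1 ∧ j1 = j2 + 1)
        ∨ (j2 = j1 ∧ i2 = i1 + 1) ∨ (j2 = j1 ∧ i1 = i2 + 1) := by omega
    rcases hc with ⟨e1, e2⟩ | ⟨e1, e2⟩ | ⟨e1, e2⟩ | ⟨e1, e2⟩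
    · have hP2' : cellA place i1 (j1 + 1) = 'P' := by rw [← e1, ← e2]; exact hP2
      exact ⟨i1, j1, hi10, hi1R, hj10, hj1C,
        (hitB_true_iff ..).2 ⟨hP1, Or.inl ⟨by omega, hP2'⟩⟩⟩
    · have hP1' : cellA place i2 (j2 + 1) = 'P' := by rw [e1, ← e2]; exact hP1
      have hP2' : cellA place i2 j2 = 'P' := hP2
      exact ⟨i2, j2, hi20, hi2R, hj20, by omega,
        (hitB_true_iff ..).2 ⟨hP2', Or.inl ⟨by omega, hP1'⟩⟩⟩
    · have hP2' : cellA place (i1 + 1) j1 = 'P' := by rw [← e2, ← e1]; exact hP2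
      exact ⟨i1, j1, hi10, hi1R, hj10, hj1C,
        (hitB_true_iff ..).2 ⟨hP1, Or.inr (Or.inl ⟨by omega, hP2'⟩)⟩⟩
    · have hP2' : cellA place i2 j1 = 'P' := by rw [← e1]; exact hP2
      have hP1' : cellA place (i2 + 1) j1 = 'P' := by rw [← e2]; exact hP1
      exact ⟨i2, j1, hi20, hi2R, hj10, hj1C,
        (hitB_true_iff ..).2 ⟨hP2', Or.inr (Or.inl ⟨by omega, hP1'⟩)⟩⟩
  · -- distance 2, same row
    simp only [Int.abs_eq_natAbs] at h1 h2
    rw [bne_iff_ne] at hv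
    have hc : j2 = j1 + 2 ∨ j1 = j2 + 2 := by omega
    rcases hc with e | e
    · have hm : min j1 j2 = j1 := by omega
      rw [hm] at hv
      have hP2' : cellA place i1 (j1 + 2) = 'P' := by rw [h3, ← e]; exact hP2
      exact ⟨i1, j1, hi10, hi1R, hj10, hj1C,
        (hitB_true_iff ..).2 ⟨hP1, Or.inr (Or.inr (Or.inl ⟨by omega, hP2', hv⟩))⟩⟩
    · have hm : min j1 j2 = j2 := by omega
      rw [hm] at hv
      have hP2' : cellA place i1 j2 = 'P' := by rw [h3]; exact hP2
      have hP1' : cellA place i1 (j2 + 2) = 'P' := by rw [← e]; exact hP1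
      exact ⟨i1, j2, hi10, hi1R, hj20, by omega,
        (hitB_true_iff ..).2 ⟨hP2', Or.inr (Or.inr (Or.inl ⟨by omega, hP1', hv⟩))⟩⟩
  · -- distance 2, same column
    simp only [Int.abs_eq_natAbs] at h1 h2
    rw [bne_iff_ne] at hv
    have hc : i2 = i1 + 2 ∨ i1 = i2 + 2 := by omega
    rcases hc with e | e
    · have hm : min i1 i2 = i1 := by omega
      rw [hm] at hv
      have hP2' : cellA place (i1 + 2) j1 = 'P' := by rw [h4, ← e]; exact hP2
      exact ⟨i1, j1, hi10, hi1R, hj10, hj1C,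
        (hitB_true_iff ..).2 ⟨hP1, Or.inr (Or.inr (Or.inr (Or.inl ⟨by omega, hP2', hv⟩)))⟩⟩
    · have hm : min i1 i2 = i2 := by omega
      rw [hm] at hv
      have hP2' : cellA place i2 j1 = 'P' := by rw [h4]; exact hP2
      have hP1' : cellA place (i2 + 2) j1 = 'P' := by rw [← e]; exact hP1
      exact ⟨i2, j1, hi20, by omega, hj10, hj1C,
        (hitB_true_iff ..).2 ⟨hP2', Or.inr (Or.inr (Or.inr (Or.inl ⟨by omega, hP1', hv⟩)))⟩⟩
  · -- distance 2, diagonal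
    simp only [Int.abs_eq_natAbs] at h1 h2
    simp only [Bool.or_eq_true, bne_iff_ne] at hv
    have hc : (i2 = i1 + 1 ∧ j2 = j1 + 1) ∨ (i2 = i1 + 1 ∧ j2 = j1 - 1)
        ∨ (i1 = i2 + 1 ∧ j1 = j2 + 1) ∨ (i1 = i2 + 1 ∧ j1 = j2 - 1) := by omega
    rcases hc with ⟨e1, e2⟩ | ⟨e1, e2⟩ | ⟨e1, e2⟩ | ⟨e1, e2⟩
    · subst e1; subst e2
      exact ⟨i1, j1, hi10, hi1R, hj10, hj1C,
        (hitB_true_iff ..).2 ⟨hP1, Or.inr (Or.inr (Or.inr (Or.inr (Or.inl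
          ⟨hi2R, hj2C, hP2, hv⟩))))⟩⟩
    · subst e1; subst e2
      exact ⟨i1, j1, hi10, hi1R, hj10, hj1C,
        (hitB_true_iff ..).2 ⟨hP1, Or.inr (Or.inr (Or.inr (Or.inr (Or.inr
          ⟨hi2R, by omega, hP2, hv⟩))))⟩⟩
    · subst e1; subst e2
      exact ⟨i2, j2, hi20, hi2R, hj20, hj2C,
        (hitB_true_iff ..).2 ⟨hP2, Or.inr (Or.inr (Or.inr (Or.inr (Or.inl
          ⟨hi1R, hj1C, hP1, Or.symm hv⟩))))⟩⟩
    · subst e1; subst e2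
      exact ⟨i2, j2, hi20, hi2R, hj20, hj2C,
        (hitB_true_iff ..).2 ⟨hP2, Or.inr (Or.inr (Or.inr (Or.inr (Or.inr
          ⟨hi1R, by omega, hP1, Or.symm hv⟩))))⟩⟩

theorem violA_right (place : List String) (i j : Int) :
    violA place (i, j) (i, j + 1) = true := by
  have h1 : |(i:Int) - i| + |j - (j + 1)| = 1 := by
    simp only [Int.abs_eq_natAbs]; omega
  simp only [violA]; rw [if_pos h1]

theorem violA_down (place : List String) (i j : Int) :
    violA place (i, j) (i + 1, j) = true := by
  have h1 : |(i:Int) - (i + 1)| + |j - j| = 1 := by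
    simp only [Int.abs_eq_natAbs]; omega
  simp only [violA]; rw [if_pos h1]

theorem violA_gap_row (place : List String) (i j : Int)
    (h : cellA place i (j + 1) ≠ 'X') : violA place (i, j) (i, j + 2) = true := by
  have h1 : ¬ (|(i:Int) - i| + |j - (j + 2)| = 1) := by
    simp only [Int.abs_eq_natAbs]; omega
  have h2 : |(i:Int) - i| + |j - (j + 2)| = 2 := by
    simp only [Int.abs_eq_natAbs]; omega
  simp only [violA]; rw [if_neg h1, if_pos h2]
  simp [bne_iff_ne, h]

theorem violA_gap_col (place : List String) (i j : Int)
    (h : cellA place (i + 1) j ≠ 'X') : violA place (i, j) (i + 2, j) = true := by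
  have h1 : ¬ (|(i:Int) - (i + 2)| + |j - j| = 1) := by
    simp only [Int.abs_eq_natAbs]; omega
  have h2 : |(i:Int) - (i + 2)| + |j - j| = 2 := by
    simp only [Int.abs_eq_natAbs]; omega
  have h3 : ¬ ((i:Int) = i + 2) := by omega
  simp only [violA]; rw [if_neg h1, if_pos h2, if_neg h3]
  simp [bne_iff_ne, h]

theorem violA_diag_r (place : List String) (i j : Int)
    (h : cellA place i (j + 1) ≠ 'X' ∨ cellA place (i + 1) j ≠ 'X') :
    violA place (i, j) (i + 1, j + 1) = true := by
  have h1 : ¬ (|(i:Int) - (i + 1)| + |j - (j + 1)| = 1) := by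
    simp only [Int.abs_eq_natAbs]; omega
  have h2 : |(i:Int) - (i + 1)| + |j - (j + 1)| = 2 := by
    simp only [Int.abs_eq_natAbs]; omega
  have h3 : ¬ ((i:Int) = i + 1) := by omega
  have h4 : ¬ ((j:Int) = j + 1) := by omega
  simp only [violA]; rw [if_neg h1, if_pos h2, if_neg h3, if_neg h4]
  simp only [Bool.or_eq_true, bne_iff_ne]
  exact h

theorem violA_diag_l (place : List String) (i j : Int)
    (h : cellA place i (j - 1) ≠ 'X' ∨ cellA place (i + 1) j ≠ 'X') :
    violA place (i, j) (i + 1, j - 1) = true := by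
  have h1 : ¬ (|(i:Int) - (i + 1)| + |j - (j - 1)| = 1) := by
    simp only [Int.abs_eq_natAbs]; omega
  have h2 : |(i:Int) - (i + 1)| + |j - (j - 1)| = 2 := by
    simp only [Int.abs_eq_natAbs]; omega
  have h3 : ¬ ((i:Int) = i + 1) := by omega
  have h4 : ¬ ((j:Int) = j - 1) := by omega
  simp only [violA]; rw [if_neg h1, if_pos h2, if_neg h3, if_neg h4]
  simp only [Bool.or_eq_true, bne_iff_ne]
  exact h

theorem hit_to_viol (place : List String)
    {i j : Int}
    (hi : 0 ≤ i) (hiR : i < (place.length : Int)) (hj : 0 ≤ j) (hjC : j < PySem.Str.len (place.headD ""))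
    (hh : hitB place (place.length : Int) (PySem.Str.len (place.headD "")) i j = true) :
    ∃ p q, p ∈ cooA place ∧ q ∈ cooA place ∧ p ≠ q ∧ violA place p q = true := by
  rw [hitB_true_iff] at hh
  obtain ⟨hP, hcase⟩ := hh
  rcases hcase with ⟨hb, hc⟩ | ⟨hb, hc⟩ | ⟨hb, hc1, hc2⟩ | ⟨hb, hc1, hc2⟩
    | ⟨hb1, hb2, hc1, hc2⟩ | ⟨hb1, hb2, hc1, hc2⟩
  · exact ⟨(i, j), (i, j + 1),
      (mem_cooA ..).2 ⟨hi, hiR, hj, hjC, hP⟩,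
      (mem_cooA ..).2 ⟨hi, hiR, by omega, hb, hc⟩,
      by simp, violA_right place i j⟩
  · exact ⟨(i, j), (i + 1, j),
      (mem_cooA ..).2 ⟨hi, hiR, hj, hjC, hP⟩,
      (mem_cooA ..).2 ⟨by omega, hb, hj, hjC, hc⟩,
      by simp, violA_down place i j⟩
  · exact ⟨(i, j), (i, j + 2),
      (mem_cooA ..).2 ⟨hi, hiR, hj, hjC, hP⟩,
      (mem_cooA ..).2 ⟨hi, hiR, by omega, hb, hc1⟩,
      by simp, violA_gap_row place i j hc2⟩
  · exact ⟨(i, j), (i + 2, j),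
      (mem_cooA ..).2 ⟨hi, hiR, hj, hjC, hP⟩,
      (mem_cooA ..).2 ⟨by omega, hb, hj, hjC, hc1⟩,
      by simp, violA_gap_col place i j hc2⟩
  · exact ⟨(i, j), (i + 1, j + 1),
      (mem_cooA ..).2 ⟨hi, hiR, hj, hjC, hP⟩,
      (mem_cooA ..).2 ⟨by omega, hb1, by omega, hb2, hc1⟩,
      by simp, violA_diag_r place i j hc2⟩
  · exact ⟨(i, j), (i + 1, j - 1),
      (mem_cooA ..).2 ⟨hi, hiR, hj, hjC, hP⟩,
      (mem_cooA ..).2 ⟨by omega, hb1, by omega, by omega, hc1⟩,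
      by simp, violA_diag_l place i j hc2⟩

theorem anyA_iff_anyB (place : List String) :
    ((pairsA (cooA place)).any (fun pq => violA place pq.1 pq.2) = true) ↔
      ((PySem.List.pyRange 0 (place.length : Int) 1).any (fun i =>
        (PySem.List.pyRange 0 (PySem.Str.len (place.headD "")) 1).any (fun j =>
          hitB place (place.length : Int) (PySem.Str.len (place.headD "")) i j)) = true) := by
  rw [List.any_eq_true]
  constructor
  · rintro ⟨⟨p, q⟩, hmem, hv⟩
    obtain ⟨hp, hq⟩ := mem_pairsA hmem
    rw [mem_cooA] at hp hq
    obtain ⟨i, j, h1, h2, h3, h4, h5⟩ := viol_to_hit place hp hq hv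
    simp only [List.any_eq_true, PySem.List.mem_pyRange_one]
    exact ⟨i, ⟨h1, h2⟩, j, ⟨h3, h4⟩, h5⟩
  · intro h
    simp only [List.any_eq_true, PySem.List.mem_pyRange_one] at h
    obtain ⟨i, ⟨hi0, hiR⟩, j, ⟨hj0, hjC⟩, hh⟩ := h
    obtain ⟨p, q, hp, hq, hne, hv⟩ := hit_to_viol place hi0 hiR hj0 hjC hh
    rcases pairsA_cover hp hq hne with hm | hm
    · exact ⟨(p, q), hm, hv⟩
    · exact ⟨(q, p), hm, by rw [← violA_symm]; exact hv⟩

-- ===== VERDICT (by name: the statement is the Claim_ definition above) =====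
theorem check_spec : Claim_equal_check := by
  intro place _ _
  unfold Spec_check check check_alt
  rw [loopA_any]
  have h := anyA_iff_anyB place
  by_cases hA : (pairsA (cooA place)).any (fun pq => violA place pq.1 pq.2) = true
  · rw [if_pos hA]
    simp only []
    rw [if_pos (h.1 hA)]
  · rw [if_neg hA]
    simp only []
    rw [if_neg (fun hB => hA (h.2 hB))]
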